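-- pv_equiv track=rewrite | github.com/romann1/leetcode | BackSpaceCompare.py | __remove_back_spaces
-- ===== SOURCE A (Python) =====
-- def __remove_back_spaces(s):
--     s2 = []
--     back_space_count = 0
--     for c in reversed(s):
--         if c == '#':
--             back_space_count += 1
--         else:
--             if back_space_count == 0:
--                 s2.append(c)
--             back_space_count = max(0, back_space_count-1)
--
--     return str(s2)
-- ===== SOURCE B (Python) =====
-- def __remove_back_spaces(s):
--     stack = []
--     for c in s:
--         if c == '#':
--             if stack:
--                 stack.pop()
--         else:
--             stack.append(c)
--     return str(stack[::-1])
-- ===== Notes on version B (the rewrite author's own statement) =====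
-- stated objective: idiomatic
-- what changed: B traverses the string forward with an explicit character stack (push on a char, pop on '#') instead of A's backward traversal over reversed(s) with a pending-backspace counter, then reverses the stack before formatting.
import Mathlib
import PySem

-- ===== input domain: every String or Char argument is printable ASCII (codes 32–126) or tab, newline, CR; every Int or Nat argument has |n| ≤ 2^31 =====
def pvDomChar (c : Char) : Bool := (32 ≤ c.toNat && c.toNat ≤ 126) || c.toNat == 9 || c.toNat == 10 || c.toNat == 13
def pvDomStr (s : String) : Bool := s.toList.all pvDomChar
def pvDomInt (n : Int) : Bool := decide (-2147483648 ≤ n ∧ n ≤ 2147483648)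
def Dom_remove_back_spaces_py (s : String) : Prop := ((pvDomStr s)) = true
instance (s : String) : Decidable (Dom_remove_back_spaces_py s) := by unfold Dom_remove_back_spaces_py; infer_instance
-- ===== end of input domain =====

-- B replaces A's backward scan with a pending-backspace counter by a forward scan with an
-- explicit character stack, reversed before formatting (objective: idiomatic; same cost).

-- Shared output formatting: hand port of Python's str(list_of_single_chars).
-- Exact on Dom (printable ASCII plus tab/newline/CR): Python repr of a one-char string uses
-- single quotes except for "'" itself, and escapes \, \t, \n, \r.
def pvCharRepr (c : Char) : String :=
  if c = '\t' then "'\\t'"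
  else if c = '\n' then "'\\n'"
  else if c = '\r' then "'\\r'"
  else if c = '\\' then "'\\\\'"
  else if c = '\'' then "\"'\""
  else "'" ++ String.ofList [c] ++ "'"

-- hand port of str([...]) : "[" + ", ".join(reprs) + "]" (exact, incl. "[]" for the empty list)
def pvListStr (l : List Char) : String :=
  "[" ++ String.intercalate ", " (l.map pvCharRepr) ++ "]"

-- ===== PORT A =====
-- literal port: fold over reversed(s) carrying (s2, back_space_count)
def remove_back_spaces_py (s : String) : String :=
  let st := (s.toList.reverse).foldl
    (fun (p : List Char × Int) c =>
      if c = '#' then (p.1, p.2 + 1)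
      else ((if p.2 = 0 then p.1 ++ [c] else p.1), max 0 (p.2 - 1)))
    ([], 0)
  pvListStr st.1

-- ===== PORT B =====
-- literal port of Source B: forward fold with a stack (append/pop at the end), reversed at the end
def remove_back_spaces_py_alt (s : String) : String :=
  let st := s.toList.foldl
    (fun (st : List Char) c => if c = '#' then st.dropLast else st ++ [c]) []
  pvListStr st.reverse

-- ===== PRECONDITION & SPEC =====
def Spec_remove_back_spaces_py (s : String) (out : String) : Prop := out = remove_back_spaces_py_alt s
instance (s : String) (out : String) : Decidable (Spec_remove_back_spaces_py s out) := by unfold Spec_remove_back_spaces_py; infer_instance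

-- ===== CLAIM (what is proved, stated in full; the proofs are below) =====
def Claim_equal_remove_back_spaces_py : Prop := ∀ (s : String), Dom_remove_back_spaces_py s → Spec_remove_back_spaces_py s (remove_back_spaces_py s)

-- ===== LEMMAS AND PROOFS =====

-- A's loop as a foldr over the original list (rightmost char processed first)
def pvFA (xs : List Char) : List Char × Int :=
  xs.foldr
    (fun c (p : List Char × Int) =>
      if c = '#' then (p.1, p.2 + 1)
      else ((if p.2 = 0 then p.1 ++ [c] else p.1), max 0 (p.2 - 1)))
    ([], 0)

theorem pvFA_nonneg (xs : List Char) : 0 ≤ (pvFA xs).2 := by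
  induction xs with
  | nil => simp [pvFA]
  | cons c t ih =>
    simp only [pvFA, List.foldr_cons] at *
    split_ifs <;> simp <;> omega

theorem pv_dropLast_iter_nil (k : ℕ) : (List.dropLast (α := Char))^[k] [] = [] := by
  induction k with
  | zero => rfl
  | succ n ih => rw [Function.iterate_succ_apply]; simpa using ih

theorem pvFA_cons_hash (t : List Char) : pvFA ('#' :: t) = ((pvFA t).1, (pvFA t).2 + 1) := by
  simp [pvFA]

theorem pvFA_cons_ne (c : Char) (t : List Char) (h : ¬ c = '#') :
    pvFA (c :: t) = ((if (pvFA t).2 = 0 then (pvFA t).1 ++ [c] else (pvFA t).1), max 0 ((pvFA t).2 - 1)) := by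
  simp [pvFA, h]

theorem pv_main (xs : List Char) : ∀ st0 : List Char,
    xs.foldl (fun (st : List Char) c => if c = '#' then st.dropLast else st ++ [c]) st0
      = (List.dropLast)^[(pvFA xs).2.toNat] st0 ++ (pvFA xs).1.reverse := by
  induction xs with
  | nil => intro st0; simp [pvFA]
  | cons c t ih =>
    intro st0
    simp only [List.foldl_cons]
    rw [ih]
    by_cases hc : c = '#'
    · subst hc
      rw [pvFA_cons_hash]
      have h2 : ((pvFA t).2 + 1).toNat = (pvFA t).2.toNat + 1 := by
        have := pvFA_nonneg t; omega
      simp only [h2, Function.iterate_succ_apply, if_true]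
    · rw [pvFA_cons_ne c t hc]
      simp only [if_neg hc]
      by_cases h0 : (pvFA t).2 = 0
      · simp [h0]
      · simp only [if_neg h0]
        have hpos : 0 < (pvFA t).2 := by have := pvFA_nonneg t; omega
        have hmax : max 0 ((pvFA t).2 - 1) = (pvFA t).2 - 1 := by omega
        have hk : (pvFA t).2.toNat = ((pvFA t).2 - 1).toNat + 1 := by omega
        rw [hmax, hk, Function.iterate_succ_apply, List.dropLast_concat]

theorem pvA_foldl_eq (s : String) :
    (s.toList.reverse).foldl
      (fun (p : List Char × Int) c =>
        if c = '#' then (p.1, p.2 + 1)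
        else ((if p.2 = 0 then p.1 ++ [c] else p.1), max 0 (p.2 - 1)))
      ([], 0) = pvFA s.toList := by
  rw [List.foldl_reverse]; rfl

-- ===== VERDICT (by name: the statement is the Claim_ definition above) =====
theorem remove_back_spaces_py_spec : Claim_equal_remove_back_spaces_py := by
  intro s _
  unfold Spec_remove_back_spaces_py remove_back_spaces_py remove_back_spaces_py_alt
  rw [pvA_foldl_eq, pv_main s.toList [], pv_dropLast_iter_nil]
  simp
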